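-- pv_equiv track=rewrite | github.com/ServiceNow/SecurityResearch | Kudan/kudan/utils.py | get_position_dist
-- ===== SOURCE A (Python) =====
-- def get_position_dist(data):
--     slices={0:0}
--     i=current=0
--     prev=x=data[0]
--     while (i <len(data)):
--         x=data[i]
--         if x==prev:
--             slices[current]+=1
--         else:
--             current=i
--             slices[current]=1
--             prev=x
--         i=i+1
--     return slices
-- ===== SOURCE B (Python) =====
-- def get_position_dist(data):
--     # Two-phase: (1) traverse the data BACKWARDS building (value, length) run
--     # pairs with no positions at all; (2) a forward prefix-sum pass turns the
--     # run lengths into start-indexed dict entries.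
--     runs = []
--     for x in reversed(data):
--         if runs and runs[-1][0] == x:
--             runs[-1] = (x, runs[-1][1] + 1)
--         else:
--             runs.append((x, 1))
--     runs.reverse()
--     out = {}
--     pos = 0
--     for _, ln in runs:
--         out[pos] = ln
--         pos += ln
--     return out
-- ===== Notes on version B (the rewrite author's own statement) =====
-- stated objective: alternative
-- what changed: Replaces A's single forward index-driven state machine (current run-start pointer, dict entry incremented once per element) with a two-phase algorithm: a backward traversal that builds positionless (value, length) run pairs, then a forward prefix-sum pass over those pairs that assigns start-index keys.
-- outside the precondition, e.g. on get_position_dist([]): A raises IndexError, B returns {}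
import Mathlib
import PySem

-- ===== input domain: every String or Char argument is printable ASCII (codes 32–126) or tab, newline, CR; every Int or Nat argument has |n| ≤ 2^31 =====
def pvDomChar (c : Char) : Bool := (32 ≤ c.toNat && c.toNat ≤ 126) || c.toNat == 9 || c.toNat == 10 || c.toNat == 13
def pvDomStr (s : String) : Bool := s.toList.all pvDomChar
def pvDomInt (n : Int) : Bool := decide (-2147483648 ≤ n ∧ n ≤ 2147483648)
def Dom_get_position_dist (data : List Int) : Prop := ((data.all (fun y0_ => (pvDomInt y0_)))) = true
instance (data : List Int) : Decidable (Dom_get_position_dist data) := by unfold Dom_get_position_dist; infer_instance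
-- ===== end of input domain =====

-- B replaces A's forward index state machine by a two-phase algorithm:
-- backward traversal building (value, length) run pairs, then a forward
-- prefix-sum pass assigning start-index keys (alternative decomposition).

-- ===== PORT A =====
-- A's loop body on (i, x): x == prev → slices[current] += 1 (the key is always
-- present, so Dict.modify with default 0 is exact); else current = i; slices[current] = 1; prev = x.
def stepA (s : PySem.Dict Int Int × Int × Int) (p : Int × Int) :
    PySem.Dict Int Int × Int × Int :=
  if p.2 = s.2.2 then (s.1.modify s.2.1 0 (· + 1), s.2.1, s.2.2)
  else (s.1.insert p.1 1, p.1, p.2)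

def get_position_dist (data : List Int) : List (Int × Int) :=
  match data with
  | [] => []  -- Python: reading the first element raises IndexError here; excluded by Pre_
  | x0 :: _ =>
    -- `while i < len(data)` reading x = data[i] is the fold over enumerate(data)
    let st := (PySem.List.enumerate data 0).foldl stepA
      (PySem.Dict.insert PySem.Dict.empty 0 0, 0, x0)
    st.1.items

-- ===== PORT B =====
-- phase 1 loop body over reversed(data): bump the last run's count or append (x, 1)
def stepRev (runs : List (Int × Int)) (x : Int) : List (Int × Int) :=
  match runs.getLast? with
  | some (v, c) => if v = x then runs.dropLast ++ [(x, c + 1)] else runs ++ [(x, 1)]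
  | none => runs ++ [(x, 1)]

-- phase 2 loop body: out[pos] = ln; pos += ln
def stepPos (s : PySem.Dict Int Int × Int) (p : Int × Int) :
    PySem.Dict Int Int × Int :=
  (s.1.insert s.2 p.2, s.2 + p.2)

def get_position_dist_alt (data : List Int) : List (Int × Int) :=
  let runs := (data.reverse.foldl stepRev []).reverse
  (runs.foldl stepPos (PySem.Dict.empty, 0)).1.items

-- ===== PRECONDITION & SPEC =====
-- Pre_ excludes only the empty list, on which A raises IndexError reading the first element.
def Pre_get_position_dist (data : List Int) : Prop := data ≠ []
instance (data : List Int) : Decidable (Pre_get_position_dist data) := by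
  unfold Pre_get_position_dist; infer_instance
def pvWitness_get_position_dist : List Int := [1, 1, 2]

def Spec_get_position_dist (data : List Int) (out : List (Int × Int)) : Prop :=
  out = get_position_dist_alt data
instance (data : List Int) (out : List (Int × Int)) : Decidable (Spec_get_position_dist data out) := by
  unfold Spec_get_position_dist; infer_instance

-- ===== CLAIM (what is proved, stated in full; the proofs are below) =====
def Claim_equal_get_position_dist : Prop := ∀ (data : List Int), Dom_get_position_dist data → Pre_get_position_dist data → Spec_get_position_dist data (get_position_dist data)

-- ===== LEMMAS AND PROOFS =====

-- The common value of both programs: run-length records (start, cnt) of the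
-- remaining list, given the current run (prev, start, cnt).
def runsAux (prev start cnt : Int) : List Int → List (Int × Int)
  | [] => [(start, cnt)]
  | x :: xs =>
    if x = prev then runsAux prev start (cnt + 1) xs
    else (start, cnt) :: runsAux x (start + cnt) 1 xs

lemma mk_contains_false {M : List (Int × Int)} {k : Int}
    (h : ∀ p ∈ M, p.1 ≠ k) : (PySem.Dict.mk M).contains k = false := by
  simp only [PySem.Dict.contains, List.any_eq_false]
  intro p hp
  simpa using h p hp

lemma mk_insert_fresh (M : List (Int × Int)) (k v : Int)
    (h : ∀ p ∈ M, p.1 ≠ k) :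
    (PySem.Dict.mk M).insert k v = PySem.Dict.mk (M ++ [(k, v)]) := by
  simp [PySem.Dict.insert, mk_contains_false h]

lemma mk_getD_last (L : List (Int × Int)) (k c : Int)
    (h : ∀ p ∈ L, p.1 ≠ k) :
    (PySem.Dict.mk (L ++ [(k, c)])).getD k 0 = c := by
  induction L with
  | nil => simp [PySem.Dict.getD, PySem.Dict.get?]
  | cons p L ih =>
    have hp : p.1 ≠ k := h p (by simp)
    have := ih (fun q hq => h q (by simp [hq]))
    simpa [PySem.Dict.getD, PySem.Dict.get?, hp] using this

lemma mk_contains_last (L : List (Int × Int)) (k c : Int) :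
    (PySem.Dict.mk (L ++ [(k, c)])).contains k = true := by
  simp [PySem.Dict.contains]

lemma mk_modify_last (L : List (Int × Int)) (k c : Int)
    (h : ∀ p ∈ L, p.1 ≠ k) :
    (PySem.Dict.mk (L ++ [(k, c)])).modify k 0 (· + 1)
      = PySem.Dict.mk (L ++ [(k, c + 1)]) := by
  rw [PySem.Dict.modify, mk_getD_last L k c h, PySem.Dict.insert, mk_contains_last]
  simp only [if_true, List.map_append, beq_iff_eq, List.map_cons, List.map_nil]
  congr 1
  have hL : L.map (fun p => if p.1 = k then (k, c + 1) else p) = L := by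
    induction L with
    | nil => rfl
    | cons q t iht =>
      simp only [List.map_cons]
      rw [if_neg (h q (by simp)), iht (fun r hr => h r (by simp [hr]))]
  rw [hL]

lemma A_loop (xs : List Int) : ∀ (L : List (Int × Int)) (start cnt prev : Int),
    (∀ p ∈ L, p.1 < start) → 0 < cnt →
    ((PySem.List.enumerate xs (start + cnt)).foldl stepA
        (PySem.Dict.mk (L ++ [(start, cnt)]), start, prev)).1.items
      = L ++ runsAux prev start cnt xs := by
  induction xs with
  | nil => intro L start cnt prev hL hc; simp [PySem.List.enumerate, runsAux]
  | cons x xs ih =>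
    intro L start cnt prev hL hc
    rw [PySem.List.enumerate_cons, List.foldl_cons]
    by_cases hx : x = prev
    · have hkeys : ∀ p ∈ L, p.1 ≠ start := fun p hp => ne_of_lt (hL p hp)
      have hst : stepA (PySem.Dict.mk (L ++ [(start, cnt)]), start, prev) (start + cnt, x)
          = (PySem.Dict.mk (L ++ [(start, cnt + 1)]), start, prev) := by
        simp [stepA, hx, mk_modify_last L start cnt hkeys]
      rw [hst, show start + cnt + 1 = start + (cnt + 1) by ring,
          ih L start (cnt + 1) prev hL (by omega)]
      simp [runsAux, hx]
    · have hkeys : ∀ p ∈ L ++ [(start, cnt)], p.1 ≠ start + cnt := by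
        intro p hp
        rcases List.mem_append.mp hp with h1 | h1
        · exact ne_of_lt (by have := hL p h1; omega)
        · have := List.mem_singleton.mp h1; subst this; simp; omega
      have hst : stepA (PySem.Dict.mk (L ++ [(start, cnt)]), start, prev) (start + cnt, x)
          = (PySem.Dict.mk ((L ++ [(start, cnt)]) ++ [(start + cnt, 1)]), start + cnt, x) := by
        simp [stepA, hx, mk_insert_fresh _ _ _ hkeys]
      have hkeys2 : ∀ p ∈ L ++ [(start, cnt)], p.1 < start + cnt := by
        intro p hp
        rcases List.mem_append.mp hp with h1 | h1
        · have := hL p h1; omega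
        · have := List.mem_singleton.mp h1; subst this; simp; omega
      rw [hst, show start + cnt + 1 = (start + cnt) + 1 by ring,
          ih (L ++ [(start, cnt)]) (start + cnt) 1 x hkeys2 (by omega)]
      simp [runsAux, hx]

lemma A_eq (x0 : Int) (xs : List Int) :
    get_position_dist (x0 :: xs) = runsAux x0 0 1 xs := by
  show ((PySem.List.enumerate (x0 :: xs) 0).foldl stepA
      (PySem.Dict.insert PySem.Dict.empty 0 0, 0, x0)).1.items = _
  have hinit : PySem.Dict.insert (PySem.Dict.empty : PySem.Dict Int Int) 0 0
      = PySem.Dict.mk [(0, 0)] := by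
    simp [PySem.Dict.insert, PySem.Dict.empty, PySem.Dict.contains]
  have hst : stepA (PySem.Dict.mk [(0, 0)], 0, x0) (0, x0)
      = (PySem.Dict.mk [(0, 1)], 0, x0) := by
    have := mk_modify_last [] 0 0 (by simp)
    simp only [List.nil_append] at this
    simp [stepA, this]
  rw [PySem.List.enumerate_cons, List.foldl_cons, hinit, hst]
  have := A_loop xs [] 0 1 x0 (by simp) (by omega)
  simpa using this

-- B-side reference: (value, length) runs of a list, built by merging the head
-- into the runs of the tail (the order in which B's backward pass builds them).
def valRuns : List Int → List (Int × Int)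
  | [] => []
  | x :: xs =>
    match valRuns xs with
    | [] => [(x, 1)]
    | (v, c) :: r => if v = x then (x, c + 1) :: r else (x, 1) :: (v, c) :: r

-- stepRev on a reversed list is the head-merge step, reversed
lemma stepRev_reverse (l : List (Int × Int)) (x : Int) :
    stepRev l.reverse x
      = (match l with
         | [] => [(x, 1)]
         | (v, c) :: r => if v = x then (x, c + 1) :: r else (x, 1) :: (v, c) :: r).reverse := by
  cases l with
  | nil => simp [stepRev]
  | cons p r =>
    obtain ⟨v, c⟩ := p
    by_cases h : v = x <;>
      simp [stepRev, List.getLast?_reverse, h]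

lemma B_phase1 (data : List Int) :
    data.reverse.foldl stepRev [] = (valRuns data).reverse := by
  induction data with
  | nil => simp [valRuns]
  | cons x xs ih =>
    rw [List.reverse_cons, List.foldl_append, ih, List.foldl_cons, List.foldl_nil,
        stepRev_reverse]
    cases h : valRuns xs with
    | nil => simp [valRuns, h]
    | cons p r => obtain ⟨v, c⟩ := p; by_cases hv : v = x <;> simp [valRuns, h, hv]

-- positions from prefix sums of the run lengths
def posify (pos : Int) : List (Int × Int) → List (Int × Int)
  | [] => []
  | (_, c) :: r => (pos, c) :: posify (pos + c) r

lemma B_phase2 (R : List (Int × Int)) : ∀ (L : List (Int × Int)) (pos : Int),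
    (∀ p ∈ L, p.1 < pos) → (∀ p ∈ R, 0 < p.2) →
    ((R.foldl stepPos (PySem.Dict.mk L, pos)).1.items) = L ++ posify pos R := by
  induction R with
  | nil => intro L pos _ _; simp [posify]
  | cons p r ih =>
    intro L pos hL hR
    obtain ⟨v, c⟩ := p
    have hc : 0 < c := hR (v, c) (by simp)
    have hkeys : ∀ q ∈ L, q.1 ≠ pos := fun q hq => ne_of_lt (hL q hq)
    have hst : stepPos (PySem.Dict.mk L, pos) (v, c)
        = (PySem.Dict.mk (L ++ [(pos, c)]), pos + c) := by
      simp [stepPos, mk_insert_fresh L pos c hkeys]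
    have hkeys2 : ∀ q ∈ L ++ [(pos, c)], q.1 < pos + c := by
      intro q hq
      rcases List.mem_append.mp hq with h1 | h1
      · have := hL q h1; omega
      · have := List.mem_singleton.mp h1; subst this; simp; omega
    rw [List.foldl_cons, hst,
        ih (L ++ [(pos, c)]) (pos + c) hkeys2 (fun q hq => hR q (by simp [hq]))]
    simp [posify]

-- merging a run (prev, cnt) onto the front of a run list
def mergeRun (prev cnt : Int) : List (Int × Int) → List (Int × Int)
  | [] => [(prev, cnt)]
  | (v, c) :: r => if v = prev then (prev, cnt + c) :: r else (prev, cnt) :: (v, c) :: r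

lemma valRuns_cons (x : Int) (xs : List Int) :
    valRuns (x :: xs) = mergeRun x 1 (valRuns xs) := by
  cases h : valRuns xs with
  | nil => simp [valRuns, mergeRun, h]
  | cons p r =>
    obtain ⟨v, c⟩ := p
    by_cases hv : v = x <;> simp [valRuns, mergeRun, h, hv] <;> omega

lemma mergeRun_mergeRun (prev cnt : Int) (R : List (Int × Int)) :
    mergeRun prev cnt (mergeRun prev 1 R) = mergeRun prev (cnt + 1) R := by
  cases R with
  | nil => simp [mergeRun]
  | cons p r =>
    obtain ⟨v, c⟩ := p
    by_cases hv : v = prev <;> simp [mergeRun, hv] <;> ring_nf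

lemma mergeRun_pos (prev cnt : Int) (R : List (Int × Int))
    (hc : 0 < cnt) (hR : ∀ p ∈ R, 0 < p.2) :
    ∀ p ∈ mergeRun prev cnt R, 0 < p.2 := by
  cases R with
  | nil => intro p hp; simp [mergeRun] at hp; simp [hp, hc]
  | cons q r =>
    obtain ⟨v, c⟩ := q
    have hcpos : 0 < c := hR (v, c) (by simp)
    by_cases hv : v = prev <;> intro p hp <;> simp [mergeRun, hv] at hp
    · rcases hp with h | h
      · simp [h]; omega
      · exact hR p (by simp [h])
    · rcases hp with h | h | h
      · simp [h, hc]
      · simp [h, hcpos]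
      · exact hR p (by simp [h])

lemma valRuns_pos (xs : List Int) : ∀ p ∈ valRuns xs, 0 < p.2 := by
  induction xs with
  | nil => simp [valRuns]
  | cons x xs ih =>
    rw [valRuns_cons]
    exact mergeRun_pos x 1 (valRuns xs) (by omega) ih

lemma posify_mergeRun (xs : List Int) : ∀ (prev start cnt : Int), 0 < cnt →
    posify start (mergeRun prev cnt (valRuns xs)) = runsAux prev start cnt xs := by
  induction xs with
  | nil => intro prev start cnt _; simp [valRuns, mergeRun, posify, runsAux]
  | cons x xs ih =>
    intro prev start cnt hc
    by_cases hx : x = prev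
    · subst hx
      rw [valRuns_cons, mergeRun_mergeRun, ih x start (cnt + 1) (by omega)]
      simp [runsAux]
    · have hhead : mergeRun prev cnt (valRuns (x :: xs))
          = (prev, cnt) :: mergeRun x 1 (valRuns xs) := by
        rw [valRuns_cons]
        cases h : valRuns xs with
        | nil => simp [mergeRun, hx]
        | cons p r =>
          obtain ⟨v, c⟩ := p
          by_cases hv : v = x <;>
            simp [mergeRun, hv, hx]
      rw [hhead]
      simp only [posify]
      rw [ih x (start + cnt) 1 (by omega)]
      simp [runsAux, hx]

lemma B_eq (x0 : Int) (xs : List Int) :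
    get_position_dist_alt (x0 :: xs) = runsAux x0 0 1 xs := by
  show (((((x0 :: xs).reverse.foldl stepRev []).reverse).foldl stepPos
      (PySem.Dict.empty, 0)).1.items) = _
  rw [B_phase1, List.reverse_reverse]
  have h2 := B_phase2 (valRuns (x0 :: xs)) [] 0 (by simp) (valRuns_pos _)
  have : (PySem.Dict.mk ([] : List (Int × Int))) = PySem.Dict.empty := rfl
  rw [this] at h2
  rw [h2, List.nil_append, valRuns_cons x0 xs, posify_mergeRun xs x0 0 1 (by omega)]

-- ===== VERDICT (by name: the statement is the Claim_ definition above) =====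
theorem get_position_dist_spec : Claim_equal_get_position_dist := by
  intro data _ hpre
  unfold Spec_get_position_dist
  match data with
  | [] => exact absurd rfl hpre
  | x0 :: xs => rw [A_eq, B_eq]
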